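-- pv_equiv track=rewrite | github.com/skaterbosse/hockey | scripts/makeTeamCatalog.py | build_tab_series
-- ===== SOURCE A (Python) =====
-- from typing import Any, Dict, List, Optional, Tuple
--
-- def tab_group_from_shortname(shortname: str) -> Optional[str]:
--     s = (shortname or "").strip().upper()
--     if s == "SHL":
--         return "SHL"
--     if s == "HA":
--         return "HA"
--     if s == "HES":
--         return "HES"
--     if s == "HEN":
--         return "HEN"
--     if s.startswith("H2"):
--         return "H2"
--     if s.startswith("H3"):
--         return "H3"
--     if s.startswith("U20"):
--         return "U20"
--     if s.startswith("U18"):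
--         return "U18"
--     if s.startswith("U16"):
--         return "U16"
--     return None
--
-- def build_tab_series(teams: List[Dict[str, Any]]) -> Dict[str, List[Tuple[str, List[Dict[str, Any]]]]]:
--     grouped: Dict[str, List[Tuple[str, List[Dict[str, Any]]]]] = {k: [] for k in ["SHL", "HA", "HES", "HEN", "H2", "H3", "U20", "U18", "U16"]}
--     series_order: Dict[str, List[str]] = {k: [] for k in grouped}
--     series_map: Dict[str, Dict[str, List[Dict[str, Any]]]] = {k: {} for k in grouped}
--     for team in teams:
--         tab = tab_group_from_shortname(team["series_shortname"])
--         if not tab: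
--             continue
--         series_name = team["series_name"]
--         if series_name not in series_map[tab]:
--             series_map[tab][series_name] = []
--             series_order[tab].append(series_name)
--         series_map[tab][series_name].append(team)
--     for tab in grouped:
--         grouped[tab] = []
--         for name in series_order[tab]:
--             grouped[tab].append((name, sorted(series_map[tab][name], key=lambda t: t["team_name"].lower())))
--     return grouped
-- ===== SOURCE B (Python) =====
-- from typing import Any, Dict, List, Optional, Tuple
--
-- _TABS = ["SHL", "HA", "HES", "HEN", "H2", "H3", "U20", "U18", "U16"]
--
-- def tab_group_from_shortname(shortname: str) -> Optional[str]:
--     s = (shortname or "").strip().upper()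
--     if s in ("SHL", "HA", "HES", "HEN"):
--         return s
--     for p in ("H2", "H3", "U20", "U18", "U16"):
--         if s.startswith(p):
--             return p
--     return None
--
-- def _series_for(tagged, tab):
--     # all teams of this tab, in input order
--     mine = [t for g, t in tagged if g == tab]
--     # distinct series names of this tab in first-appearance order
--     names = []
--     for t in mine:
--         if t["series_name"] not in names:
--             names.append(t["series_name"])
--     return [(n, sorted([t for t in mine if t["series_name"] == n],
--                        key=lambda t: t["team_name"].lower()))
--             for n in names]
--
-- def build_tab_series(teams: List[Dict[str, Any]]) -> Dict[str, List[Tuple[str, List[Dict[str, Any]]]]]: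
--     # Classify each team once, then answer each of the nine fixed tabs by plain
--     # list scans: no grouping dict, no incremental accumulator state at all.
--     tagged = [(tab_group_from_shortname(t["series_shortname"]), t) for t in teams]
--     return {tab: _series_for(tagged, tab) for tab in _TABS}
-- ===== Notes on version B (the rewrite author's own statement) =====
-- stated objective: alternative
-- what changed: A builds the grouping in one pass with three parallel dicts (grouped/series_order/series_map) mutated per team; B keeps no grouping state at all: it classifies each team once, then answers each of the nine fixed tabs by staged list scans (filter the tab's teams, dedup their series names in first-appearance order, filter per name and sort).
import Mathlib
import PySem

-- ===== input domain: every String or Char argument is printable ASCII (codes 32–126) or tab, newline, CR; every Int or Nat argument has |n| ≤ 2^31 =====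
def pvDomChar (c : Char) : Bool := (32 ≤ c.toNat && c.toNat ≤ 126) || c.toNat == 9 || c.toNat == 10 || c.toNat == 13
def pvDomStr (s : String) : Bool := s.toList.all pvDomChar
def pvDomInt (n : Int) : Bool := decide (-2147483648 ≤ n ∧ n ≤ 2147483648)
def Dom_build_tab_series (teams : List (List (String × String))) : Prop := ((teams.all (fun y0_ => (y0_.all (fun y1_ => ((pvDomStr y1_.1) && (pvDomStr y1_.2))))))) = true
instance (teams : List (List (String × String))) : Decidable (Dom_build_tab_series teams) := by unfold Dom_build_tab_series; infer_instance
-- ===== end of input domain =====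

-- B keeps no grouping state: it classifies each team once, then answers each of the nine fixed
-- tabs by staged list scans (filter, dedup names in first-appearance order, filter per name, sort);
-- A's three parallel dicts disappear (objective: alternative, same values).

-- ===== PORT A =====

def pvTabs : List String := ["SHL", "HA", "HES", "HEN", "H2", "H3", "U20", "U18", "U16"]

-- team[k] on a Python dict: first match in the association list.  The "" default is never
-- reached on Pre_ (Python raises KeyError exactly there; Pre_ excludes those inputs).
def pvLookup (t : List (String × String)) (k : String) : String :=
  (((t.find? (fun p => p.1 == k)).map (·.2)).getD "")

def tab_group_from_shortname (shortname : String) : Option String :=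
  -- '(shortname or "")' is the identity on a str argument ("" stays "")
  let s := PySem.Str.upper (PySem.Str.strip shortname)
  if s == "SHL" then some "SHL"
  else if s == "HA" then some "HA"
  else if s == "HES" then some "HES"
  else if s == "HEN" then some "HEN"
  else if PySem.Str.startswith s "H2" then some "H2"
  else if PySem.Str.startswith s "H3" then some "H3"
  else if PySem.Str.startswith s "U20" then some "U20"
  else if PySem.Str.startswith s "U18" then some "U18"
  else if PySem.Str.startswith s "U16" then some "U16"
  else none

-- Python's sorted key: lambda t: t["team_name"].lower()
def pvSortKey (t : List (String × String)) : String := PySem.Str.lower (pvLookup t "team_name")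

-- {k: [] for k in [...]} (and for series_map, {} values); Python's 'for tab in grouped'
-- iterates these nine keys
def pvG0 : PySem.Dict String (List (String × List (List (String × String)))) :=
  pvTabs.foldl (fun d k => d.insert k []) PySem.Dict.empty
def pvSO0 : PySem.Dict String (List String) :=
  pvTabs.foldl (fun d k => d.insert k []) PySem.Dict.empty
def pvSM0 : PySem.Dict String (PySem.Dict String (List (List (String × String)))) :=
  pvTabs.foldl (fun d k => d.insert k PySem.Dict.empty) PySem.Dict.empty

-- the body of A's first loop ('if not tab: continue' is the none case: tab_group_from_shortname
-- never returns the falsy ""); the in-place mutations of series_map[tab] become re-inserts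
def pvStepA (st : PySem.Dict String (List String) × PySem.Dict String (PySem.Dict String (List (List (String × String)))))
    (team : List (String × String)) :
    PySem.Dict String (List String) × PySem.Dict String (PySem.Dict String (List (List (String × String)))) :=
  match tab_group_from_shortname (pvLookup team "series_shortname") with
  | none => st
  | some tab =>
    let series_name := pvLookup team "series_name"
    let inner := st.2.getD tab PySem.Dict.empty
    let (so, inner) :=
      if inner.contains series_name then (st.1, inner)
      else (st.1.insert tab (st.1.getD tab [] ++ [series_name]), inner.insert series_name [])
    (so, st.2.insert tab (inner.insert series_name (inner.getD series_name [] ++ [team])))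

def build_tab_series (teams : List (List (String × String))) : List (String × List (String × (List (List (String × String))))) :=
  let st := teams.foldl pvStepA (pvSO0, pvSM0)
  -- second loop: grouped[tab] = [(name, sorted(...)) for name in series_order[tab]], built by appends
  let grouped := pvG0.keys.foldl (fun g tab =>
    g.insert tab ((st.1.getD tab []).foldl (fun acc name =>
      acc ++ [(name, PySem.List.sorted ((st.2.getD tab PySem.Dict.empty).getD name []) pvSortKey false)]) [])) pvG0
  grouped.items

-- ===== PORT B =====

def tab_group_from_shortname_alt (shortname : String) : Option String :=
  let s := PySem.Str.upper (PySem.Str.strip shortname)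
  if (["SHL", "HA", "HES", "HEN"] : List String).contains s then some s
  else (["H2", "H3", "U20", "U18", "U16"] : List String).find? (fun p => PySem.Str.startswith s p)

-- _series_for(tagged, tab): three staged scans over plain lists
def pvSeriesFor (tagged : List (Option String × List (String × String))) (tab : String) :
    List (String × List (List (String × String))) :=
  -- mine = [t for g, t in tagged if g == tab]
  let mine := (tagged.filter (fun p => p.1 == some tab)).map (·.2)
  -- names: first-appearance dedup via 'not in' + append
  let names := mine.foldl (fun ns t =>
    if ns.contains (pvLookup t "series_name") then ns else ns ++ [pvLookup t "series_name"]) ([] : List String)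
  names.map (fun n =>
    (n, PySem.List.sorted (mine.filter (fun t => pvLookup t "series_name" == n)) pvSortKey false))

def build_tab_series_alt (teams : List (List (String × String))) : List (String × List (String × (List (List (String × String))))) :=
  let tagged := teams.map (fun t => (tab_group_from_shortname_alt (pvLookup t "series_shortname"), t))
  -- dict comprehension over the nine distinct literal tab keys: its items are exactly this map
  pvTabs.map (fun tab => (tab, pvSeriesFor tagged tab))

-- ===== PRECONDITION & SPEC =====

-- which shortnames get a tab group (used only to state Pre_)
def pvHasTab (s : String) : Bool :=
  let u := PySem.Str.upper (PySem.Str.strip s)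
  (["SHL", "HA", "HES", "HEN"] : List String).contains u ||
    (["H2", "H3", "U20", "U18", "U16"] : List String).any (fun p => PySem.Str.startswith u p)

-- Pre_ excludes exactly the inputs where Python A raises KeyError: a team without a
-- "series_shortname" key, or a team whose shortname gets a tab group but which lacks a
-- "series_name" or "team_name" key.
def Pre_build_tab_series (teams : List (List (String × String))) : Prop :=
  ∀ t ∈ teams, ((t.find? (fun p => p.1 == "series_shortname")).isSome ∧
    (pvHasTab (((t.find? (fun p => p.1 == "series_shortname")).map (·.2)).getD "") = true →
      (t.find? (fun p => p.1 == "series_name")).isSome ∧ (t.find? (fun p => p.1 == "team_name")).isSome))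
instance (teams : List (List (String × String))) : Decidable (Pre_build_tab_series teams) := by
  unfold Pre_build_tab_series; infer_instance

def pvWitness_build_tab_series : (List (List (String × String))) :=
  [[("series_shortname", "SHL"), ("series_name", "SHL 2024"), ("team_name", "AIK")],
   [("series_shortname", "x")]]

def Spec_build_tab_series (teams : List (List (String × String))) (out : List (String × List (String × (List (List (String × String)))))) : Prop := out = build_tab_series_alt teams
instance (teams : List (List (String × String))) (out : List (String × List (String × (List (List (String × String)))))) : Decidable (Spec_build_tab_series teams out) := by
  unfold Spec_build_tab_series
  -- instance search alone exceeds its size limit on this deeply nested type; assemble it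
  have d1 : DecidableEq (List (String × List (List (String × String)))) := inferInstance
  have d2 : DecidableEq (String × List (String × List (List (String × String)))) := @instDecidableEqProd _ _ _ d1
  exact @instDecidableEqList _ d2 _ _

-- ===== CLAIM (what is proved, stated in full; the proofs are below) =====
def Claim_equal_build_tab_series : Prop := ∀ (teams : List (List (String × String))), Dom_build_tab_series teams → Pre_build_tab_series teams → Spec_build_tab_series teams (build_tab_series teams)

-- ===== LEMMAS AND PROOFS =====

-- the two tab classifiers agree
theorem pv_tga_eq (s : String) : tab_group_from_shortname_alt s = tab_group_from_shortname s := by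
  unfold tab_group_from_shortname_alt tab_group_from_shortname
  dsimp only
  generalize PySem.Str.upper (PySem.Str.strip s) = u
  simp only [List.contains_cons, List.contains_nil, List.find?]
  split_ifs <;> simp_all

-- key/payload extracted from a team, none when the team is skipped
def pvEv (team : List (String × String)) : Option ((String × String) × List (String × String)) :=
  match tab_group_from_shortname (pvLookup team "series_shortname") with
  | none => none
  | some tab => some ((tab, pvLookup team "series_name"), team)

-- A's loop body on the extracted key/payload
def pvStepP (st : PySem.Dict String (List String) × PySem.Dict String (PySem.Dict String (List (List (String × String)))))
    (p : (String × String) × List (String × String)) :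
    PySem.Dict String (List String) × PySem.Dict String (PySem.Dict String (List (List (String × String)))) :=
  let inner := st.2.getD p.1.1 PySem.Dict.empty
  ((if inner.contains p.1.2 then st.1 else st.1.insert p.1.1 (st.1.getD p.1.1 [] ++ [p.1.2])),
   st.2.insert p.1.1 (inner.insert p.1.2 (inner.getD p.1.2 [] ++ [p.2])))

theorem pv_stepA_ev (st : PySem.Dict String (List String) × PySem.Dict String (PySem.Dict String (List (List (String × String)))))
    (team : List (String × String)) :
    pvStepA st team = match pvEv team with | none => st | some p => pvStepP st p := by
  unfold pvStepA pvEv pvStepP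
  cases htg : tab_group_from_shortname (pvLookup team "series_shortname") with
  | none => rfl
  | some tab =>
    dsimp only
    by_cases hc : (st.2.getD tab PySem.Dict.empty).contains (pvLookup team "series_name") = true
    · simp [hc]
    · have hcf : (st.2.getD tab PySem.Dict.empty).contains (pvLookup team "series_name") = false :=
        by simpa using hc
      simp [hc, PySem.Dict.getD_insert_self, PySem.Dict.insert_insert_self]
      rw [PySem.Dict.getD_of_not_contains _ _ hcf]
      rfl

-- initial-state lookups
theorem pv_so0_getD (k : String) : pvSO0.getD k [] = [] := by
  simp [pvSO0, pvTabs, List.foldl, PySem.Dict.getD_insert, PySem.Dict.getD_empty]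
theorem pv_sm0_getD (k : String) : pvSM0.getD k PySem.Dict.empty = PySem.Dict.empty := by
  simp [pvSM0, pvTabs, List.foldl, PySem.Dict.getD_insert, PySem.Dict.getD_empty]

theorem pv_ofList_append {A : Type} [BEq A] [LawfulBEq A] (xs : List A) (x : A) :
    PySem.Set.ofList (xs ++ [x]) =
      if x ∈ xs then PySem.Set.ofList xs else PySem.Set.ofList xs ++ [x] := by
  have h1 : PySem.Set.ofList (xs ++ [x]) = PySem.Set.add (PySem.Set.ofList xs) x := by
    simp [PySem.Set.ofList, List.foldl_append]
  rw [h1, PySem.Set.add]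
  by_cases h : x ∈ xs
  · simp [PySem.Set.contains, h, PySem.Set.mem_ofList]
  · simp [PySem.Set.contains, PySem.Set.mem_ofList, h]

-- closed form of A's loop state
theorem pv_stateA (l : List ((String × String) × List (String × String))) :
    (∀ k, ((l.foldl pvStepP (pvSO0, pvSM0)).1).getD k [] =
      ((PySem.Set.ofList (l.map (·.1))).filter (fun kk => kk.1 == k)).map (·.2)) ∧
    (∀ k n, (((l.foldl pvStepP (pvSO0, pvSM0)).2).getD k PySem.Dict.empty).getD n [] =
      (l.filter (fun p => p.1 == (k, n))).map (·.2)) ∧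
    (∀ k n, (((l.foldl pvStepP (pvSO0, pvSM0)).2).getD k PySem.Dict.empty).contains n =
      decide ((k, n) ∈ l.map (·.1))) := by
  induction l using List.reverseRecOn with
  | nil =>
    refine ⟨fun k => ?_, fun k n => ?_, fun k n => ?_⟩
    · simp [pv_so0_getD, PySem.Set.ofList, PySem.Set.empty]
    · simp [pv_sm0_getD, PySem.Dict.getD_empty]
    · simp [pv_sm0_getD, PySem.Dict.contains_empty]
  | append_singleton l p ih =>
    obtain ⟨ih1, ih2, ih3⟩ := ih
    obtain ⟨⟨tab, name⟩, tm⟩ := p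
    simp only [List.foldl_append, List.foldl_cons, List.foldl_nil, List.map_append,
      List.map_cons, List.map_nil]
    refine ⟨fun k => ?_, fun k n => ?_, fun k n => ?_⟩
    · -- series_order component
      rw [pv_ofList_append]
      by_cases hmem : (tab, name) ∈ l.map (·.1)
      · have hcont : ((l.foldl pvStepP (pvSO0, pvSM0)).2.getD tab PySem.Dict.empty).contains name = true := by
          rw [ih3]; simp [hmem]
        simp only [pvStepP, hcont, if_true, hmem, ih1]
      · have hcont : ((l.foldl pvStepP (pvSO0, pvSM0)).2.getD tab PySem.Dict.empty).contains name = false := by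
          rw [ih3]; simp [hmem]
        simp only [pvStepP, hcont, Bool.false_eq_true, if_false, hmem]
        by_cases hk : k = tab
        · subst hk
          rw [PySem.Dict.getD_insert_self, ih1]
          simp [List.filter_append, List.map_append]
        · rw [PySem.Dict.getD_insert_of_ne _ _ _ hk, ih1]
          have : (((tab, name) : String × String).1 == k) = false := by
            simp; exact fun h => hk h.symm
          simp [List.filter_append, this]
    · -- series_map values component
      simp only [pvStepP]
      by_cases hk : k = tab
      · subst hk
        rw [PySem.Dict.getD_insert_self]
        by_cases hn : n = name
        · subst hn
          rw [PySem.Dict.getD_insert_self, ih2]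
          simp [List.filter_append]
        · rw [PySem.Dict.getD_insert_of_ne _ _ _ hn, ih2]
          have : ((((k, name), tm) : (String × String) × List (String × String)).1 == (k, n)) = false := by
            simp; exact fun h => hn h.symm
          simp [List.filter_append, this]
      · rw [PySem.Dict.getD_insert_of_ne _ _ _ hk, ih2]
        have : ((((tab, name), tm) : (String × String) × List (String × String)).1 == (k, n)) = false := by
          simp; exact fun h _ => hk h.symm
        simp [List.filter_append, this]
    · -- series_map contains component
      simp only [pvStepP]
      by_cases hk : k = tab
      · subst hk
        rw [PySem.Dict.getD_insert_self, PySem.Dict.contains_insert, ih3]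
        by_cases hn : n = name
        · subst hn; simp
        · have : (n == name) = false := by simpa using hn
          simp [this, hn]
      · rw [PySem.Dict.getD_insert_of_ne _ _ _ hk, ih3]
        have : ¬((k, n) = (tab, name)) := by
          intro h; exact hk (congrArg Prod.fst h)
        simp [this]

-- a fold of plain re-inserts at already-present keys, as items
theorem pv_fold_insert_items {V : Type} (F : String → V) (ks : List String) :
    ∀ (g : PySem.Dict String V), g.keys.Nodup → (∀ k ∈ ks, g.contains k = true) →
    (ks.foldl (fun g k => g.insert k (F k)) g).items =
      g.items.map (fun p => if p.1 ∈ ks then (p.1, F p.1) else p) := by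
  induction ks with
  | nil => intro g _ _; simp
  | cons k ks ih =>
    intro g hnd hcont
    have hc : g.contains k = true := hcont k (by simp)
    have hitems : (g.insert k (F k)).items =
        g.items.map (fun p => if (p.1 == k) = true then (k, F k) else p) :=
      PySem.Dict.items_insert_of_contains g (F k) hc
    have hkeys : (g.insert k (F k)).keys = g.keys := by
      simp only [PySem.Dict.keys, hitems, List.map_map]
      refine List.map_congr_left (fun p _ => ?_)
      by_cases hpk : (p.1 == k) = true
      · simp [Function.comp, hpk]; exact (eq_of_beq hpk).symm
      · simp [Function.comp, hpk]
    have hcont' : ∀ k' ∈ ks, (g.insert k (F k)).contains k' = true := by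
      intro k' hk'
      rw [PySem.Dict.contains_insert]
      simp [hcont k' (by simp [hk'])]
    rw [List.foldl_cons, ih _ (hkeys ▸ hnd) hcont', hitems, List.map_map]
    refine List.map_congr_left (fun p _ => ?_)
    by_cases hpk : (p.1 == k) = true
    · have hek : p.1 = k := eq_of_beq hpk
      simp only [Function.comp, if_true, hek, List.mem_cons, true_or]
      by_cases hmem : k ∈ ks <;> simp [hmem]
    · have hek : p.1 ≠ k := by simpa using hpk
      simp [Function.comp, hpk, List.mem_cons, hek]

theorem pv_g0_items : pvG0.items = pvTabs.map (fun k => (k, ([] : List (String × List (List (String × String)))))) := by rfl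
theorem pv_g0_keys : pvG0.keys = pvTabs := by rfl
theorem pv_g0_nodup : pvG0.keys.Nodup := by rw [pv_g0_keys]; decide
theorem pv_g0_contains (k : String) (h : k ∈ pvTabs) : pvG0.contains k = true := by
  simp [pvTabs] at h
  rcases h with rfl | rfl | rfl | rfl | rfl | rfl | rfl | rfl | rfl <;> rfl

-- the kept (key, team) pairs, their distinct keys in first-appearance order, and the teams per key
def pvL (teams : List (List (String × String))) : List ((String × String) × List (String × String)) :=
  teams.filterMap pvEv
def pvD (teams : List (List (String × String))) : List (String × String) :=
  PySem.Set.ofList ((pvL teams).map (·.1))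
def pvVals (teams : List (List (String × String))) (kk : String × String) : List (List (String × String)) :=
  ((pvL teams).filter (fun p => p.1 == kk)).map (·.2)

-- the common closed form both ports reach
def pvOut (teams : List (List (String × String))) : List (String × List (String × (List (List (String × String))))) :=
  pvTabs.map (fun k => (k, ((pvD teams).filter (fun kk => kk.1 == k)).map
    (fun kk => (kk.2, PySem.List.sorted (pvVals teams kk) pvSortKey false))))

theorem pv_foldA (teams : List (List (String × String))) (st0 : PySem.Dict String (List String) × PySem.Dict String (PySem.Dict String (List (List (String × String))))) :
    teams.foldl pvStepA st0 = (pvL teams).foldl pvStepP st0 := by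
  induction teams generalizing st0 with
  | nil => rfl
  | cons t ts ih =>
    simp only [List.foldl_cons, pvL, List.filterMap_cons, pv_stepA_ev]
    cases pvEv t <;> simp only [List.foldl_cons] <;> exact ih _

theorem pv_A_eq (teams : List (List (String × String))) : build_tab_series teams = pvOut teams := by
  unfold build_tab_series
  rw [pv_foldA, pv_g0_keys]
  rw [pv_fold_insert_items _ pvTabs pvG0 pv_g0_nodup (fun k hk => pv_g0_contains k hk),
    pv_g0_items, List.map_map]
  obtain ⟨ih1, ih2, _⟩ := pv_stateA (pvL teams)
  unfold pvOut pvD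
  refine List.map_congr_left (fun k hk => ?_)
  simp only [Function.comp, hk, if_true]
  refine congrArg (fun z => (k, z)) ?_
  rw [PySem.List.foldl_append_singleton_eq_map
    (fun name => (name, PySem.List.sorted ((((pvL teams).foldl pvStepP (pvSO0, pvSM0)).2.getD k PySem.Dict.empty).getD name []) pvSortKey false))]
  rw [List.nil_append, ih1 k, List.map_map]
  refine List.map_congr_left (fun kk hkk => ?_)
  have hk1 : kk.1 = k := by
    have := List.of_mem_filter hkk
    simpa using this
  simp only [Function.comp, ← hk1, ih2 kk.1 kk.2, Prod.mk.eta, pvVals]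

-- ===== B-side lemmas =====

-- every kept pair carries its own team: the stored series_name is the key's second component
theorem pv_pvL_snd (teams : List (List (String × String))) (p : (String × String) × List (String × String))
    (hp : p ∈ pvL teams) : pvLookup p.2 "series_name" = p.1.2 := by
  obtain ⟨t, _, ht⟩ := List.mem_filterMap.mp hp
  unfold pvEv at ht
  cases htg : tab_group_from_shortname (pvLookup t "series_shortname") with
  | none => rw [htg] at ht; exact absurd ht (by simp)
  | some tab =>
    rw [htg] at ht
    simp only [Option.some.injEq] at ht
    subst ht
    rfl

-- B's 'mine' list for a tab, through pvL
theorem pv_mine (teams : List (List (String × String))) (k : String) :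
    ((teams.map (fun t => (tab_group_from_shortname_alt (pvLookup t "series_shortname"), t))).filter
        (fun p => p.1 == some k)).map (·.2) =
      ((pvL teams).filter (fun p => p.1.1 == k)).map (·.2) := by
  induction teams with
  | nil => rfl
  | cons t ts ih =>
    simp only [List.map_cons, pv_tga_eq]
    simp only [pv_tga_eq] at ih
    cases htg : tab_group_from_shortname (pvLookup t "series_shortname") with
    | none =>
      have hev : pvEv t = none := by unfold pvEv; rw [htg]
      have hL : pvL (t :: ts) = pvL ts := by
        unfold pvL
        rw [List.filterMap_cons, hev]
      rw [hL, List.filter_cons]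
      simp only [show (((none : Option String), t).1 == some k) = false from rfl,
        Bool.false_eq_true, if_false]
      exact ih
    | some tab =>
      have hev : pvEv t = some ((tab, pvLookup t "series_name"), t) := by unfold pvEv; rw [htg]
      have hL : pvL (t :: ts) = ((tab, pvLookup t "series_name"), t) :: pvL ts := by
        unfold pvL
        rw [List.filterMap_cons, hev]
      rw [hL, List.filter_cons]
      by_cases hk : (tab == k) = true
      · have h1 : ((some tab : Option String) == some k) = true := by simpa using hk
        have h2 : ((((tab, pvLookup t "series_name"), t) : (String × String) × List (String × String)).1.1 == k) = true := hk
        rw [List.filter_cons]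
        simp only [h1, h2, if_true, List.map_cons]
        rw [ih]
      · have h1 : ((some tab : Option String) == some k) = false := by simpa using hk
        have h2 : ((((tab, pvLookup t "series_name"), t) : (String × String) × List (String × String)).1.1 == k) = false := by simpa using hk
        rw [List.filter_cons]
        simp only [h1, h2, Bool.false_eq_true, if_false]
        exact ih

-- the 'not in / append' fold is first-appearance dedup of the mapped keys
theorem pv_names_fold {A : Type} (key : A → String) (l : List A) :
    l.foldl (fun ns t => if ns.contains (key t) then ns else ns ++ [key t]) [] =
      PySem.Set.ofList (l.map key) := by
  suffices h : ∀ s : List String,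
      l.foldl (fun ns t => if ns.contains (key t) then ns else ns ++ [key t]) s =
        (l.map key).foldl PySem.Set.add s from by
    rw [h, PySem.Set.ofList_eq_foldl]
  induction l with
  | nil => intro s; rfl
  | cons t ts ih =>
    intro s
    simp only [List.foldl_cons, List.map_cons]
    rw [ih]
    congr 1

-- first-appearance dedup commutes with a filter-then-project on the first component
theorem pv_ofList_filter_map (l : List (String × String)) (k : String) :
    PySem.Set.ofList ((l.filter (fun p => p.1 == k)).map (·.2)) =
      ((PySem.Set.ofList l).filter (fun p => p.1 == k)).map (·.2) := by
  induction l using List.reverseRecOn with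
  | nil => rfl
  | append_singleton l x ih =>
    rw [List.filter_append, pv_ofList_append]
    by_cases hx : (x.1 == k) = true
    · have hxk : x.1 = k := eq_of_beq hx
      simp only [List.filter_cons, hx, if_true, List.filter_nil, List.map_append, List.map_cons, List.map_nil]
      rw [pv_ofList_append]
      by_cases hmem : x ∈ l
      · have hm2 : x.2 ∈ (l.filter (fun p => p.1 == k)).map (·.2) :=
          List.mem_map.mpr ⟨x, List.mem_filter.mpr ⟨hmem, hx⟩, rfl⟩
        simp [hmem, hm2, ih]
      · have hm2 : x.2 ∉ (l.filter (fun p => p.1 == k)).map (·.2) := by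
          intro hmm
          obtain ⟨y, hyf, hy2⟩ := List.mem_map.mp hmm
          obtain ⟨hyl, hyk⟩ := List.mem_filter.mp hyf
          have hyx : y = x := Prod.ext (by rw [eq_of_beq hyk, hxk]) hy2
          exact hmem (hyx ▸ hyl)
        simp [hmem, hm2, ih, List.filter_append, hx]
    · simp only [List.filter_cons, hx, Bool.false_eq_true, if_false, List.filter_nil, List.append_nil]
      by_cases hmem : x ∈ l
      · simp [hmem, ih]
      · simp [hmem, ih, List.filter_append, hx]

theorem pv_B_eq (teams : List (List (String × String))) : build_tab_series_alt teams = pvOut teams := by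
  unfold build_tab_series_alt pvOut
  refine List.map_congr_left (fun k hk => ?_)
  refine congrArg (fun z => (k, z)) ?_
  simp only [pvSeriesFor]
  rw [pv_mine]
  have hnames :
      (((pvL teams).filter (fun p => p.1.1 == k)).map (·.2)).foldl
          (fun ns t => if ns.contains (pvLookup t "series_name") then ns else ns ++ [pvLookup t "series_name"]) [] =
        (((pvD teams).filter (fun kk => kk.1 == k)).map (·.2)) := by
    rw [pv_names_fold, List.map_map]
    have hcongr : ((pvL teams).filter (fun p => p.1.1 == k)).map ((fun t => pvLookup t "series_name") ∘ (·.2)) =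
        ((pvL teams).filter (fun p => p.1.1 == k)).map (fun p => p.1.2) := by
      refine List.map_congr_left (fun p hp => ?_)
      exact pv_pvL_snd teams p (List.mem_of_mem_filter hp)
    rw [hcongr]
    have hmm : ((pvL teams).filter (fun p => p.1.1 == k)).map (fun p => p.1.2) =
        (((pvL teams).map (·.1)).filter (fun kk => kk.1 == k)).map (·.2) := by
      rw [List.filter_map, List.map_map]
      rfl
    rw [hmm, pv_ofList_filter_map]
    rfl
  rw [hnames, List.map_map]
  refine List.map_congr_left (fun kk hkk => ?_)
  obtain ⟨kk1, kk2⟩ := kk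
  have hk1 : kk1 = k := by
    have := List.of_mem_filter hkk
    simpa using this
  subst hk1
  simp only [Function.comp]
  refine congrArg (fun z => (kk2, PySem.List.sorted z pvSortKey false)) ?_
  rw [List.filter_map]
  unfold pvVals
  rw [List.filter_filter]
  congr 1
  refine List.filter_congr (fun p hp => ?_)
  have hsnd := pv_pvL_snd teams p hp
  obtain ⟨⟨p1, p2⟩, pt⟩ := p
  simp only at hsnd
  simp [Function.comp, hsnd]
  rw [Bool.and_comm]
  rfl

-- ===== VERDICT (by name: the statement is the Claim_ definition above) =====
theorem build_tab_series_spec : Claim_equal_build_tab_series := by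
  intro teams _ _
  unfold Spec_build_tab_series
  rw [pv_A_eq, pv_B_eq]
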